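-- pv_equiv track=rewrite | github.com/carlmcneil-ops/weatherbrain | caravan_text.py | _compress_camp
-- ===== SOURCE A (Python) =====
-- from typing import Dict, Any, List
--
-- def _compress_camp(bits: List[str]) -> str:
--     """
--     Turn lots of 'Camp: ...' notes into one human sentence.
--     """
--     if not bits:
--         return "Camp conditions look fine."
--
--     lower = [b.lower() for b in bits]
--
--     has_light_breeze = any("light breeze" in b for b in lower)
--     has_breezy_ok = any("breezy but okay" in b or "breezy" in b for b in lower)
--     has_odd_shower = any("odd shower" in b for b in lower)
--     has_onoff_showers = any("on/off showers" in b for b in lower)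
--     has_basically_dry = any("basically dry" in b for b in lower)
--     has_proper_rain = any("proper rain" in b for b in lower)
--
--     parts: List[str] = []
--
--     # Wind at camp
--     if has_light_breeze:
--         parts.append("light breeze")
--     elif has_breezy_ok:
--         parts.append("breezy")
--
--     # Rain
--     if has_proper_rain:
--         parts.append("proper rain on the cards")
--     elif has_onoff_showers or has_odd_shower:
--         parts.append("occasional showers")
--
--     # Dryness
--     if has_basically_dry and not has_proper_rain:
--         parts.append("mostly dry")
--
--     if not parts:
--         return "Camp conditions look fine."
--
--     # Capitalise first word
--     return parts[0].capitalize() + (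
--         ", " + ", ".join(parts[1:]) if len(parts) > 1 else ""
--     )
-- ===== SOURCE B (Python) =====
-- from typing import List
--
-- # Full sentences precomputed per (wind, rain, dry) state; no parts assembly needed.
-- _SENTENCES = {
--     (0, 0, False): "Camp conditions look fine.",
--     (0, 0, True): "Mostly dry",
--     (0, 1, False): "Occasional showers",
--     (0, 1, True): "Occasional showers, mostly dry",
--     (0, 2, False): "Proper rain on the cards",
--     (1, 0, False): "Breezy",
--     (1, 0, True): "Breezy, mostly dry",
--     (1, 1, False): "Breezy, occasional showers",
--     (1, 1, True): "Breezy, occasional showers, mostly dry",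
--     (1, 2, False): "Breezy, proper rain on the cards",
--     (2, 0, False): "Light breeze",
--     (2, 0, True): "Light breeze, mostly dry",
--     (2, 1, False): "Light breeze, occasional showers",
--     (2, 1, True): "Light breeze, occasional showers, mostly dry",
--     (2, 2, False): "Light breeze, proper rain on the cards",
-- }
--
-- def _compress_camp(bits: List[str]) -> str:
--     # Join the notes into one text (targets contain no newline, so no false
--     # cross-note matches), classify it into a (wind, rain, dry) key, look it up.
--     text = "\n".join(bits).lower()
--     wind = 2 if "light breeze" in text else (1 if "breezy" in text else 0)
--     rain = 2 if "proper rain" in text else (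
--         1 if "on/off showers" in text or "odd shower" in text else 0)
--     dry = "basically dry" in text and rain != 2
--     return _SENTENCES[(wind, rain, dry)]
-- ===== Notes on version B (the rewrite author's own statement) =====
-- stated objective: faster
-- what changed: B joins all notes into one newline-separated lowercased text (the per-bit Python-level loop and the six any() scans disappear; targets contain no newline so no cross-note match), classifies it into a (wind, rain, dry) state key, and returns a precomputed full-sentence table entry, eliminating A's parts list, branch chain, join and capitalize logic.
import Mathlib
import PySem

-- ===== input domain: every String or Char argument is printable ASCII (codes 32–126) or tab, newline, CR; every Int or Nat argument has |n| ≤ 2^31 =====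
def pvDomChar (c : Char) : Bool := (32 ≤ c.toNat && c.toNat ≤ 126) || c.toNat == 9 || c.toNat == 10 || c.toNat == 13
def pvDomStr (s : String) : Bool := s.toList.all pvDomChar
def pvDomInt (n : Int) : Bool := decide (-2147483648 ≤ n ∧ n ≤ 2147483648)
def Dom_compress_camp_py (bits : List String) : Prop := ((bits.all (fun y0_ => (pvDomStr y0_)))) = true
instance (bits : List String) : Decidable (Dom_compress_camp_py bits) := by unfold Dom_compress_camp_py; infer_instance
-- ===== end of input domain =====

-- B joins the notes into one newline-separated lowered text, classifies it into a (wind, rain, dry)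
-- key and returns a precomputed full-sentence table entry (measured faster in a timing run).


-- ===== PORT A =====
-- 'a + b' on str, by hand via code points (exact; Lean's String.append is kernel-opaque)
def strCat (a b : String) : String := String.ofList (a.toList ++ b.toList)

-- hand port of str.capitalize: first code point upper-cased, the rest lower-cased (exact on ASCII)
def pyCapitalize (s : String) : String :=
  match s.toList with
  | [] => ""
  | c :: rest => String.ofList (PySem.Chars.upperChar c :: PySem.Chars.lower rest)

def compress_camp_py (bits : List String) : String :=
  if bits = [] then "Camp conditions look fine."
  else
    let lower := bits.map PySem.Str.lower
    let has_light_breeze := lower.any (fun b => PySem.Str.isIn "light breeze" b)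
    let has_breezy_ok := lower.any (fun b => PySem.Str.isIn "breezy but okay" b || PySem.Str.isIn "breezy" b)
    let has_odd_shower := lower.any (fun b => PySem.Str.isIn "odd shower" b)
    let has_onoff_showers := lower.any (fun b => PySem.Str.isIn "on/off showers" b)
    let has_basically_dry := lower.any (fun b => PySem.Str.isIn "basically dry" b)
    let has_proper_rain := lower.any (fun b => PySem.Str.isIn "proper rain" b)
    let parts : List String := []
    let parts := if has_light_breeze then parts ++ ["light breeze"]
      else if has_breezy_ok then parts ++ ["breezy"] else parts
    let parts := if has_proper_rain then parts ++ ["proper rain on the cards"]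
      else if has_onoff_showers || has_odd_shower then parts ++ ["occasional showers"] else parts
    let parts := if has_basically_dry && !has_proper_rain then parts ++ ["mostly dry"] else parts
    if parts = [] then "Camp conditions look fine."
    else strCat (pyCapitalize (PySem.List.pyGetD parts 0 ""))
      (if 1 < parts.length then strCat ", " (PySem.Str.join ", " (PySem.List.slice parts (some 1) none)) else "")

-- ===== PORT B =====
-- Source B's module-level _SENTENCES dict: full sentences precomputed per (wind, rain, dry) state
def pvSentences : PySem.Dict (Int × Int × Bool) String := PySem.Dict.ofList
  [((0, 0, false), "Camp conditions look fine."),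
   ((0, 0, true), "Mostly dry"),
   ((0, 1, false), "Occasional showers"),
   ((0, 1, true), "Occasional showers, mostly dry"),
   ((0, 2, false), "Proper rain on the cards"),
   ((1, 0, false), "Breezy"),
   ((1, 0, true), "Breezy, mostly dry"),
   ((1, 1, false), "Breezy, occasional showers"),
   ((1, 1, true), "Breezy, occasional showers, mostly dry"),
   ((1, 2, false), "Breezy, proper rain on the cards"),
   ((2, 0, false), "Light breeze"),
   ((2, 0, true), "Light breeze, mostly dry"),
   ((2, 1, false), "Light breeze, occasional showers"),
   ((2, 1, true), "Light breeze, occasional showers, mostly dry"),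
   ((2, 2, false), "Light breeze, proper rain on the cards")]

def compress_camp_py_alt (bits : List String) : String :=
  let text := PySem.Str.lower (PySem.Str.join "\n" bits)
  let wind : Int := if PySem.Str.isIn "light breeze" text then 2
    else if PySem.Str.isIn "breezy" text then 1 else 0
  let rain : Int := if PySem.Str.isIn "proper rain" text then 2
    else if PySem.Str.isIn "on/off showers" text || PySem.Str.isIn "odd shower" text then 1 else 0
  let dry : Bool := PySem.Str.isIn "basically dry" text && decide (rain ≠ 2)
  -- the key (wind, rain, dry) is always present in the table, so d[k] cannot raise; getD is exact here
  PySem.Dict.getD pvSentences (wind, rain, dry) ""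

-- ===== PRECONDITION & SPEC =====
def Spec_compress_camp_py (bits : List String) (out : String) : Prop := out = compress_camp_py_alt bits
instance (bits : List String) (out : String) : Decidable (Spec_compress_camp_py bits out) := by unfold Spec_compress_camp_py; infer_instance

-- ===== CLAIM =====
def Claim_equal_compress_camp_py : Prop := ∀ (bits : List String), Dom_compress_camp_py bits → Spec_compress_camp_py bits (compress_camp_py bits)

-- ===== LEMMAS AND PROOFS =====

-- an infix of a ++ c :: b avoiding c lies wholly in a or in b
theorem infix_split {t a b : List Char} {c : Char} (hc : c ∉ t) (h : t <:+: a ++ c :: b) : t <:+: a ∨ t <:+: b := by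
  obtain ⟨s1, s2, e⟩ := h
  have hlen := congrArg List.length e
  simp at hlen
  by_cases h1 : s1.length + t.length ≤ a.length
  · left
    have hp : (s1 ++ t) <+: a ++ c :: b := ⟨s2, by simpa using e⟩
    have := List.prefix_of_prefix_length_le hp (List.prefix_append a (c :: b)) (by simp; omega)
    exact ((List.suffix_append s1 t).isInfix).trans this.isInfix
  · by_cases h2 : a.length + 1 ≤ s1.length
    · right
      have hs : (t ++ s2) <:+ a ++ c :: b := ⟨s1, by simpa using e⟩
      have hb : b <:+ a ++ c :: b := ⟨a ++ [c], by simp⟩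
      have := List.suffix_of_suffix_length_le hs hb (by simp; omega)
      exact ((List.prefix_append t s2).isInfix).trans this.isInfix
    · exfalso
      have hlt : a.length - s1.length < t.length := by omega
      have hge : s1.length ≤ a.length := by omega
      rw [List.append_assoc] at e
      have h3 : (s1 ++ (t ++ s2))[a.length]'(by simp; omega) = t[a.length - s1.length]'hlt := by
        rw [List.getElem_append_right hge]
        rw [List.getElem_append_left hlt]
      have h5 := List.getElem_of_eq e (show a.length < (s1 ++ (t ++ s2)).length by simp; omega)
      have hi : (a ++ c :: b)[a.length]'(by simp) = c := by
        simp [List.getElem_append_right (Nat.le_refl _)]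
      have : t[a.length - s1.length]'hlt = c := h3.symm.trans (h5.trans hi)
      exact hc (this ▸ List.getElem_mem _)

-- a nonempty target avoiding the separator occurs in the joined text iff it occurs in some piece
theorem isIn_intercalate {t : List Char} {c : Char} (ht : t ≠ []) (hc : c ∉ t) (l : List (List Char)) :
    PySem.Chars.isIn t (List.intercalate [c] l) = l.any (fun x => PySem.Chars.isIn t x) := by
  induction l with
  | nil =>
    simp [List.intercalate]
    rw [PySem.Chars.isIn_eq_false_iff]
    intro h
    exact ht (List.eq_nil_of_infix_nil h)
  | cons x xs ih =>
    cases xs with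
    | nil => simp [List.intercalate]
    | cons y ys =>
      have hstep : List.intercalate [c] (x :: y :: ys) = x ++ c :: List.intercalate [c] (y :: ys) := by
        simp [List.intercalate, List.intersperse]
      rw [hstep]
      refine Bool.eq_iff_iff.mpr ?_
      rw [PySem.Chars.isIn_iff_infix]
      constructor
      · intro h
        rcases infix_split hc h with h | h
        · have hx : PySem.Chars.isIn t x = true := (PySem.Chars.isIn_iff_infix _ _).mpr h
          simp [hx]
        · have hrest : PySem.Chars.isIn t (List.intercalate [c] (y :: ys)) = true :=
            (PySem.Chars.isIn_iff_infix _ _).mpr h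
          rw [ih] at hrest
          simp only [List.any_cons, Bool.or_eq_true] at hrest ⊢
          exact Or.inr hrest
      · intro h
        simp only [List.any_cons, Bool.or_eq_true] at h
        rcases h with h | h
        · exact ((PySem.Chars.isIn_iff_infix _ _).mp h).trans ⟨[], c :: List.intercalate [c] (y :: ys), by simp⟩
        · have hrest : t <:+: List.intercalate [c] (y :: ys) := by
            rw [← PySem.Chars.isIn_iff_infix, ih]
            simpa using h
          exact hrest.trans ⟨x ++ [c], [], by simp⟩

-- lowering distributes over the joined text
theorem map_intercalate {f : Char → Char} {c : Char} (l : List (List Char)) :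
    List.map f (List.intercalate [c] l) = List.intercalate [f c] (l.map (List.map f)) := by
  induction l with
  | nil => simp [List.intercalate]
  | cons x xs ih =>
    cases xs with
    | nil => simp [List.intercalate]
    | cons y ys =>
      have h1 : List.intercalate [c] (x :: y :: ys) = x ++ c :: List.intercalate [c] (y :: ys) := by
        simp [List.intercalate, List.intersperse]
      have h2 : List.intercalate [f c] (List.map f x :: List.map f y :: List.map (List.map f) ys)
          = List.map f x ++ f c :: List.intercalate [f c] (List.map f y :: List.map (List.map f) ys) := by
        simp [List.intercalate, List.intersperse]
      simp only [List.map_cons] at ih ⊢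
      rw [h1, h2, List.map_append, List.map_cons, ih]

-- B's membership tests over the joined lowered text ARE A's per-bit scans
theorem scan_join (t : String) (ht : t.toList ≠ []) (hn : '\n' ∉ t.toList) (bits : List String) :
    PySem.Str.isIn t (PySem.Str.lower (PySem.Str.join "\n" bits))
      = bits.any (fun b => PySem.Str.isIn t (PySem.Str.lower b)) := by
  rw [PySem.Str.isIn_eq]
  rw [PySem.Str.toList_lower, PySem.Str.toList_join]
  show PySem.Chars.isIn t.toList (List.map PySem.Chars.lowerChar (List.intercalate ['\n'] (bits.map String.toList))) = _
  rw [map_intercalate]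
  have : PySem.Chars.lowerChar '\n' = '\n' := by decide
  rw [this, isIn_intercalate ht hn]
  simp [List.any_map, Function.comp_def, PySem.Str.isIn_eq, PySem.Str.toList_lower, PySem.Chars.lower]

-- a string containing "breezy but okay" contains "breezy"
theorem breezy_mono (s : String) (h : PySem.Str.isIn "breezy but okay" s = true) :
    PySem.Str.isIn "breezy" s = true := by
  rw [PySem.Str.isIn_iff_infix] at h ⊢
  exact List.IsInfix.trans (by decide) h

-- so A's 'breezy but okay or breezy' scan equals B's plain 'breezy' scan
theorem breezy_any (l : List String) :
    l.any (fun b => PySem.Str.isIn "breezy but okay" (PySem.Str.lower b)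
                    || PySem.Str.isIn "breezy" (PySem.Str.lower b))
      = l.any (fun b => PySem.Str.isIn "breezy" (PySem.Str.lower b)) := by
  refine Bool.eq_iff_iff.mpr ?_
  simp only [List.any_eq_true, Bool.or_eq_true]
  constructor
  · rintro ⟨b, hb, h | h⟩
    · exact ⟨b, hb, breezy_mono _ h⟩
    · exact ⟨b, hb, h⟩
  · rintro ⟨b, hb, h⟩
    exact ⟨b, hb, Or.inr h⟩

-- parts[1:] on the A side is a plain drop
theorem slice_one (xs : List String) : PySem.List.slice xs (some 1) none = xs.drop 1 := by
  simpa using PySem.List.slice_from_natCast xs 1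

-- ===== VERDICT (by name: the statement is the Claim_ definition above) =====
set_option maxHeartbeats 1000000 in
theorem compress_camp_py_spec : Claim_equal_compress_camp_py := by
  intro bits _
  unfold Spec_compress_camp_py compress_camp_py compress_camp_py_alt
  by_cases hb : bits = []
  · subst hb; decide
  · simp only [if_neg hb,
      scan_join "light breeze" (by decide) (by decide) bits,
      scan_join "breezy" (by decide) (by decide) bits,
      scan_join "proper rain" (by decide) (by decide) bits,
      scan_join "on/off showers" (by decide) (by decide) bits,
      scan_join "odd shower" (by decide) (by decide) bits,
      scan_join "basically dry" (by decide) (by decide) bits,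
      List.any_map, Function.comp_def, breezy_any]
    generalize bits.any (fun b => PySem.Str.isIn "light breeze" (PySem.Str.lower b)) = b1
    generalize bits.any (fun b => PySem.Str.isIn "breezy" (PySem.Str.lower b)) = b2
    generalize bits.any (fun b => PySem.Str.isIn "odd shower" (PySem.Str.lower b)) = b3
    generalize bits.any (fun b => PySem.Str.isIn "on/off showers" (PySem.Str.lower b)) = b4
    generalize bits.any (fun b => PySem.Str.isIn "basically dry" (PySem.Str.lower b)) = b5
    generalize bits.any (fun b => PySem.Str.isIn "proper rain" (PySem.Str.lower b)) = b6
    cases b1 <;> cases b2 <;> cases b3 <;> cases b4 <;> cases b5 <;> cases b6 <;>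
      simp only [slice_one] <;> decide
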